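-- pv_equiv track=rewrite | github.com/SathishRM/Data_Structures_and_Algorithms_Practice_Problems | string/DeleteCharactersToMakeFancyString.py | makeFancyStringFirstApproach
-- ===== SOURCE A (Python) =====
-- def makeFancyStringFirstApproach(s: str) -> str:
--     for i in range(1,len(s)):
--         j = i
--         while j < len(s) and s[j-1] == s[j]:
--             j+=1
--
--         if j - i >= 2:
--             s = s[:i+1] + s[j:]
--             i = j
--         i+=1
--     return s
-- ===== SOURCE B (Python) =====
-- def makeFancyStringFirstApproach(s: str) -> str:
--     out = []
--     for c in s:
--         if len(out) >= 2 and out[-1] == c and out[-2] == c: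
--             continue
--         out.append(c)
--     return ''.join(out)
-- ===== Notes on version B (the rewrite author's own statement) =====
-- stated objective: faster
-- what changed: Replaced the rescan-and-rebuild loop (which rescans runs and rebuilds the whole string by slicing on every long run) with a single left-to-right pass that appends each character unless the two previously kept characters already equal it.
import Mathlib
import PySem

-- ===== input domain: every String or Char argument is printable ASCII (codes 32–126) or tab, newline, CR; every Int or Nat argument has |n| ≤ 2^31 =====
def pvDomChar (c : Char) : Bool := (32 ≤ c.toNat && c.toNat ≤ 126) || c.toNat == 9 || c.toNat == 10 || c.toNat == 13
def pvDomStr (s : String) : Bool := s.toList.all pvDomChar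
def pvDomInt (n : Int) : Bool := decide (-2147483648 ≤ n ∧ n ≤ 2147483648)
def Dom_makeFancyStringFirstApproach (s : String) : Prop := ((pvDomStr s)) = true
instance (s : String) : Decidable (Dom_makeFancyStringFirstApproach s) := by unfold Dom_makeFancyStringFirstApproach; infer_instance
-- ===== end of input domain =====

-- B replaces A's rescan-and-rebuild loop by a single pass that keeps a char unless the two
-- previously kept chars already equal it (objective: faster).

-- ===== PORT A =====
-- the inner `while j < len(s) and s[j-1] == s[j]: j += 1`; both indexed accesses are in
-- range under the guard (1 ≤ j at every call), so List.getD is exact here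
def pvRunA (l : List Char) (j : Nat) : Nat :=
  if h : j < l.length ∧ l.getD (j - 1) ' ' = l.getD j ' ' then pvRunA l (j + 1) else j
termination_by l.length - j
decreasing_by omega

-- one body of the `for i in range(1, len(s))` loop; the Python reassignments `i = j; i += 1`
-- are dead (the for-loop overwrites i on every iteration), so they are not part of the state;
-- s[:i+1] / s[j:] are take / drop since i+1 and j are nonnegative
def pvStepA (l : List Char) (i : Nat) : List Char :=
  let j := pvRunA l i
  if 2 ≤ j - i then l.take (i + 1) ++ l.drop j else l

-- range(1, len(s)) is evaluated once, on the original string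
def makeFancyStringFirstApproach (s : String) : String :=
  String.ofList ((List.range' 1 (s.toList.length - 1)).foldl pvStepA s.toList)

-- ===== PORT B =====
-- body of B's single pass: append c unless the last two kept chars (out[-1], out[-2]) equal c
def pvKeepB (out : List Char) (c : Char) : List Char :=
  if 2 ≤ out.length ∧ PySem.List.pyGet? out (-1) = some c ∧ PySem.List.pyGet? out (-2) = some c
  then out else out ++ [c]

def makeFancyStringFirstApproach_alt (s : String) : String :=
  String.ofList (s.toList.foldl pvKeepB [])

-- ===== PRECONDITION & SPEC =====
def Spec_makeFancyStringFirstApproach (s : String) (out : String) : Prop := out = makeFancyStringFirstApproach_alt s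
instance (s : String) (out : String) : Decidable (Spec_makeFancyStringFirstApproach s out) := by unfold Spec_makeFancyStringFirstApproach; infer_instance

-- ===== CLAIM (what is proved, stated in full; the proofs are below) =====
def Claim_equal_makeFancyStringFirstApproach : Prop := ∀ (s : String), Dom_makeFancyStringFirstApproach s → Spec_makeFancyStringFirstApproach s (makeFancyStringFirstApproach s)

-- ===== LEMMAS AND PROOFS =====

-- state-machine form of B's pass: (p, q) are the second-to-last and last kept chars
def pvGo (p q : Option Char) : List Char → List Char
  | [] => []
  | c :: t => if p = some c ∧ q = some c then pvGo p q t else c :: pvGo q (some c) t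

theorem pvLen2 (out : List Char) (c : Char) (h : PySem.List.pyGet? out (-2) = some c) :
    2 ≤ out.length := by
  by_contra hn
  rw [show (PySem.List.pyGet? out (-2)) = none from (PySem.List.pyGet?_eq_none_iff out (-2)).mpr (by
    simp [PySem.Raise.InRange]; omega)] at h
  simp at h

theorem pvGet2_append (out : List Char) (c : Char) :
    PySem.List.pyGet? (out ++ [c]) (-2) = PySem.List.pyGet? out (-1) := by
  by_cases h : out = []
  · subst h; simp [PySem.List.pyGet?, PySem.List.pyIdx?]
  · have hl : 0 < out.length := List.length_pos_iff.mpr h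
    rw [PySem.List.pyGet?_neg_ofNat _ 2 (by omega) (by simp; omega), PySem.List.pyGet?_neg_one]
    rw [List.getLast?_eq_getElem?]
    simp only [List.length_append, List.length_cons, List.length_nil]
    rw [List.getElem?_append_left (by omega)]
    congr 1

-- B's fold is pvGo driven by the last two kept chars
theorem pvFoldB (l : List Char) : ∀ out,
    l.foldl pvKeepB out
      = out ++ pvGo (PySem.List.pyGet? out (-2)) (PySem.List.pyGet? out (-1)) l := by
  induction l with
  | nil => intro out; simp [pvGo]
  | cons c t ih =>
    intro out
    simp only [List.foldl_cons, pvGo]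
    by_cases hc : PySem.List.pyGet? out (-2) = some c ∧ PySem.List.pyGet? out (-1) = some c
    · have hk : pvKeepB out c = out := by
        unfold pvKeepB
        rw [if_pos ⟨pvLen2 out c hc.1, hc.2, hc.1⟩]
      rw [hk, if_pos ⟨hc.1, hc.2⟩, ih out]
    · have hk : pvKeepB out c = out ++ [c] := by
        unfold pvKeepB
        rw [if_neg (by tauto)]
      rw [hk, if_neg (by tauto), ih (out ++ [c])]
      rw [pvGet2_append, PySem.List.pyGet?_neg_one_append_singleton]
      simp

-- pvGo ignores a third consecutive equal char, whatever the state
theorem pvGo_triple (p q : Option Char) (c : Char) (v : List Char) :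
    pvGo p q (c :: c :: c :: v) = pvGo p q (c :: c :: v) := by
  by_cases h1 : p = some c ∧ q = some c
  · simp [pvGo, h1]
  · by_cases h2 : q = some c
    · have hp : ¬ p = some c := fun hp => h1 ⟨hp, h2⟩
      simp [pvGo, hp, h2]
    · simp [pvGo, h2]

theorem pvGo_congr (w1 w2 : List Char) (h : ∀ p q, pvGo p q w1 = pvGo p q w2) :
    ∀ (u : List Char) (p q : Option Char), pvGo p q (u ++ w1) = pvGo p q (u ++ w2) := by
  intro u
  induction u with
  | nil => exact h
  | cons a t ih =>
    intro p q
    simp only [List.cons_append, pvGo]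
    by_cases hc : p = some a ∧ q = some a
    · simp [hc, ih]
    · simp [hc, ih]

theorem pvGo_replicate (c : Char) (k : Nat) (v : List Char) (p q : Option Char) :
    pvGo p q (c :: c :: (List.replicate k c ++ v)) = pvGo p q (c :: c :: v) := by
  induction k generalizing p q with
  | zero => simp
  | succ n ih =>
    have : (c :: c :: (List.replicate (n+1) c ++ v)) = c :: c :: c :: (List.replicate n c ++ v) := by
      simp [List.replicate_succ]
    rw [this, pvGo_triple, ih]

-- facts about the inner scan pvRunA
theorem pvRunA_unfold (l : List Char) (j : Nat) :
    pvRunA l j = if j < l.length ∧ l.getD (j - 1) ' ' = l.getD j ' ' then pvRunA l (j + 1) else j := by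
  rw [pvRunA]; split <;> simp_all

theorem pvRunA_ge (l : List Char) (j : Nat) : j ≤ pvRunA l j := by
  induction j using pvRunA.induct (l := l) with
  | case1 j h ih => rw [pvRunA_unfold, if_pos h]; omega
  | case2 j h => rw [pvRunA_unfold, if_neg h]

theorem pvRunA_le (l : List Char) (j : Nat) (hj : j ≤ l.length) : pvRunA l j ≤ l.length := by
  induction j using pvRunA.induct (l := l) with
  | case1 j h ih => rw [pvRunA_unfold, if_pos h]; exact ih (by omega)
  | case2 j h => rw [pvRunA_unfold, if_neg h]; omega

theorem pvRunA_eq (l : List Char) (j : Nat) :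
    ∀ t, j ≤ t → t < pvRunA l j → l.getD (t - 1) ' ' = l.getD t ' ' := by
  induction j using pvRunA.induct (l := l) with
  | case1 j h ih =>
    intro t ht hlt
    rcases Nat.eq_or_lt_of_le ht with rfl | ht'
    · exact h.2
    · exact ih t ht' (by rwa [pvRunA_unfold, if_pos h] at hlt)
  | case2 j h =>
    intro t ht hlt
    rw [pvRunA_unfold, if_neg h] at hlt; omega

theorem pvRunA_stop (l : List Char) (j : Nat) (h : pvRunA l j < l.length) :
    l.getD (pvRunA l j - 1) ' ' ≠ l.getD (pvRunA l j) ' ' := by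
  induction j using pvRunA.induct (l := l) with
  | case1 j hc ih => rw [pvRunA_unfold, if_pos hc] at h ⊢; exact ih h
  | case2 j hc =>
    rw [pvRunA_unfold, if_neg hc] at h ⊢
    intro he; exact hc ⟨h, he⟩

-- the scanned run is constant
theorem pvRunA_const (l : List Char) (i : Nat) (hi : 1 ≤ i) :
    ∀ t, i - 1 ≤ t → t ≤ pvRunA l i - 1 → l.getD t ' ' = l.getD (i - 1) ' ' := by
  intro t
  induction t with
  | zero =>
    intro h _
    have : i = 1 := by omega
    simp [this]
  | succ n ih =>
    intro h1 h2
    by_cases hn : i - 1 ≤ n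
    · have hge := pvRunA_ge l i
      have he : l.getD n ' ' = l.getD (i - 1) ' ' := ih hn (by omega)
      have hstep := pvRunA_eq l i (n + 1) (by omega) (by omega)
      simp only [Nat.add_sub_cancel] at hstep
      exact hstep.symm.trans he
    · have : n + 1 = i - 1 := by omega
      rw [this]

-- a constant segment is a replicate
theorem pvSeg (l : List Char) (c : Char) : ∀ (k a b : Nat), a + k = b → b ≤ l.length →
    (∀ t, a ≤ t → t < b → l.getD t ' ' = c) →
    l.drop a = List.replicate k c ++ l.drop b := by
  intro k
  induction k with
  | zero =>
    intro a b hab _ _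
    have : a = b := by omega
    simp [this]
  | succ m ih =>
    intro a b hab hb h
    have ha : a < l.length := by omega
    rw [List.drop_eq_getElem_cons ha]
    have hc : l[a] = c := by
      have := h a (le_refl a) (by omega)
      rwa [List.getD_eq_getElem _ _ ha] at this
    rw [List.replicate_succ, hc]
    simp only [List.cons_append, List.cons.injEq, true_and]
    exact ih (a+1) b (by omega) hb (fun t ht hlt => h t (by omega) hlt)

-- geometry of a deleting step
theorem pvRun_geom (l : List Char) (i : Nat) (h2 : 2 ≤ pvRunA l i - i) :
    i + 2 ≤ pvRunA l i ∧ pvRunA l i ≤ l.length := by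
  have hge := pvRunA_ge l i
  by_cases hil : i ≤ l.length
  · exact ⟨by omega, pvRunA_le l i hil⟩
  · rw [pvRunA_unfold, if_neg (by omega)] at h2 ⊢
    omega

-- the scanned constant run, spelled out
theorem pvDecomp (l : List Char) (i : Nat) (hi : 1 ≤ i) (h2 : 2 ≤ pvRunA l i - i) :
    l.drop (i - 1) = (l.getD (i-1) ' ') :: (l.getD (i-1) ' ') ::
      (List.replicate (pvRunA l i - i - 1) (l.getD (i-1) ' ') ++ l.drop (pvRunA l i)) := by
  obtain ⟨hij, hjl⟩ := pvRun_geom l i h2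
  have := pvSeg l (l.getD (i-1) ' ') (pvRunA l i - (i-1)) (i-1) (pvRunA l i)
    (by omega) hjl (fun t ht hlt => pvRunA_const l i hi t ht (by omega))
  rw [show pvRunA l i - (i-1) = (pvRunA l i - i - 1) + 2 by omega] at this
  rw [this, List.replicate_succ, List.replicate_succ]
  simp

-- one A-step preserves pvGo (from any state)
theorem pvStep_go (l : List Char) (i : Nat) (hi : 1 ≤ i) (p q : Option Char) :
    pvGo p q (pvStepA l i) = pvGo p q l := by
  unfold pvStepA
  by_cases h2 : 2 ≤ pvRunA l i - i
  · rw [if_pos h2]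
    obtain ⟨hij, hjl⟩ := pvRun_geom l i h2
    set c := l.getD (i-1) ' ' with hc
    have hdec := pvDecomp l i hi h2
    have htake : l.take (i + 1) = l.take (i - 1) ++ [c, c] := by
      rw [show i + 1 = (i - 1) + 2 by omega, List.take_add, hdec]
      simp [hc, List.getD]
    calc pvGo p q (l.take (i+1) ++ l.drop (pvRunA l i))
        = pvGo p q (l.take (i-1) ++ (c :: c :: l.drop (pvRunA l i))) := by
          rw [htake]; simp
      _ = pvGo p q (l.take (i-1) ++ (c :: c :: (List.replicate (pvRunA l i - i - 1) c ++ l.drop (pvRunA l i)))) := by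
          exact (pvGo_congr _ _ (fun p q => (pvGo_replicate c _ _ p q)) (l.take (i-1)) p q).symm
      _ = pvGo p q l := by rw [← hdec, List.take_append_drop]
  · rw [if_neg h2]

-- a step never grows the list
theorem pvStep_len (l : List Char) (i : Nat) : (pvStepA l i).length ≤ l.length := by
  unfold pvStepA
  by_cases h2 : 2 ≤ pvRunA l i - i
  · rw [if_pos h2]
    have hge := pvRunA_ge l i
    simp only [List.length_append, List.length_take, List.length_drop]
    omega
  · rw [if_neg h2]

-- index-based "no triple whose last index is below k"
def pvNT (k : Nat) (l : List Char) : Prop :=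
  ∀ p, p + 2 < l.length → p + 2 ≤ k →
    ¬ (l.getD p ' ' = l.getD (p + 1) ' ' ∧ l.getD (p + 1) ' ' = l.getD (p + 2) ' ')

theorem pvStep_NT (l : List Char) (i : Nat) (hi : 1 ≤ i) (h : pvNT i l) :
    pvNT (i + 1) (pvStepA l i) := by
  unfold pvStepA
  by_cases h2 : 2 ≤ pvRunA l i - i
  · rw [if_pos h2]
    obtain ⟨hij, hjl⟩ := pvRun_geom l i h2
    have hgetD : ∀ t, t ≤ i → (l.take (i + 1) ++ l.drop (pvRunA l i)).getD t ' ' = l.getD t ' ' := by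
      intro t ht
      rw [List.getD_append _ _ _ _ (by simp; omega)]
      simp [List.getD, List.getElem?_take_of_lt (by omega : t < i + 1)]
    intro p hplen hpk htrip
    simp only [List.length_append, List.length_take, List.length_drop] at hplen
    by_cases hpi : p + 2 ≤ i
    · rw [hgetD p (by omega), hgetD (p+1) (by omega), hgetD (p+2) (by omega)] at htrip
      exact h p (by omega) hpi htrip
    · have hip : i = p + 1 := by omega
      subst hip
      have hjlt : pvRunA l (p+1) < l.length := by omega
      simp only [show p + 1 + 1 = p + 2 from rfl] at hgetD htrip
      have hlast : ((l.take (p + 2)) ++ l.drop (pvRunA l (p+1))).getD (p + 2) ' '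
          = l.getD (pvRunA l (p+1)) ' ' := by
        have htl : (l.take (p+2)).length = p + 2 := by simp; omega
        simp only [List.getD]
        rw [List.getElem?_append_right (by omega), htl, Nat.sub_self]
        simp [List.getElem?_drop]
      rw [hgetD (p+1) (by omega), hlast] at htrip
      have hc1 : l.getD (p + 1) ' ' = l.getD p ' ' :=
        pvRunA_const l (p+1) (by omega) (p+1) (by omega) (by omega)
      have hc2 : l.getD (pvRunA l (p+1) - 1) ' ' = l.getD p ' ' := by
        have := pvRunA_const l (p+1) (by omega) (pvRunA l (p+1) - 1) (by omega) (by omega)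
        simpa using this
      have hstop := pvRunA_stop l (p+1) hjlt
      rw [hc2, ← hc1] at hstop
      exact hstop htrip.2
  · rw [if_neg h2]
    intro p hplen hpk htrip
    by_cases hpi : p + 2 ≤ i
    · exact h p hplen hpi htrip
    · have hip : i = p + 1 := by omega
      subst hip
      have : pvRunA l (p+1) = pvRunA l (p+3) := by
        rw [pvRunA_unfold]
        rw [if_pos ⟨by omega, by simpa using htrip.1⟩]
        rw [pvRunA_unfold]
        rw [if_pos ⟨by omega, by simpa using htrip.2⟩]
      have := pvRunA_ge l (p+3)
      omega

-- the loop invariant over range' 1 n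
theorem pvLoop_inv (l0 : List Char) (n : Nat) :
    pvNT (n + 1) ((List.range' 1 n).foldl pvStepA l0) ∧
    ((List.range' 1 n).foldl pvStepA l0).length ≤ l0.length ∧
    (∀ p q, pvGo p q ((List.range' 1 n).foldl pvStepA l0) = pvGo p q l0) := by
  induction n with
  | zero =>
    refine ⟨?_, le_refl _, fun p q => rfl⟩
    intro p _ hk; omega
  | succ m ih =>
    obtain ⟨ihNT, ihLen, ihGo⟩ := ih
    rw [List.range'_1_concat, List.foldl_append]
    simp only [List.foldl_cons, List.foldl_nil]
    refine ⟨?_, ?_, ?_⟩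
    · have := pvStep_NT ((List.range' 1 m).foldl pvStepA l0) (m + 1) (by omega) ihNT
      rwa [Nat.add_comm 1 m]
    · exact le_trans (pvStep_len _ _) ihLen
    · intro p q
      rw [pvStep_go _ _ (by omega), ihGo]

-- structural "no triple anywhere"
def pvNTL : List Char → Prop
  | a :: b :: c :: t => ¬ (a = b ∧ b = c) ∧ pvNTL (b :: c :: t)
  | _ => True

theorem pvNTL_of_NT : ∀ (l : List Char), (∀ p, p + 2 < l.length →
    ¬ (l.getD p ' ' = l.getD (p + 1) ' ' ∧ l.getD (p + 1) ' ' = l.getD (p + 2) ' ')) → pvNTL l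
  | [], _ => trivial
  | [_], _ => trivial
  | [_, _], _ => trivial
  | a :: b :: c :: t, h => by
    refine ⟨?_, pvNTL_of_NT (b :: c :: t) ?_⟩
    · have := h 0 (by simp)
      simpa using this
    · intro p hp
      have := h (p + 1) (by simp at hp ⊢; omega)
      simpa using this

-- on a triple-free list, with a compatible state, pvGo keeps everything
theorem pvGo_id : ∀ (l : List Char) (p q : Option Char), pvNTL l →
    (∀ c, p = some c → q = some c → l.head? ≠ some c) →
    (∀ c, q = some c → l.head? = some c → l.tail.head? ≠ some c) →
    pvGo p q l = l := by
  intro l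
  induction l with
  | nil => intros; rfl
  | cons c t ih =>
    intro p q hntl h1 h2
    have hnc : ¬ (p = some c ∧ q = some c) := by
      rintro ⟨hp, hq⟩
      exact h1 c hp hq rfl
    rw [pvGo, if_neg hnc]
    congr 1
    refine ih q (some c) ?_ ?_ ?_
    · match t, hntl with
      | [], _ => trivial
      | [_], _ => trivial
      | x :: y :: t', hn => exact hn.2
    · intro d hq hcd
      exact h2 d hq (by simpa using hcd)
    · intro d hcd hhead htail
      match t, hntl, hhead, htail with
      | x :: y :: t', hn, hx, hy =>
        apply hn.1
        simp only [List.head?_cons, List.tail_cons, Option.some.injEq] at hcd hx hy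
        exact ⟨by rw [hcd, hx], by rw [hx, hy]⟩

-- ===== VERDICT (by name: the statement is the Claim_ definition above) =====
theorem makeFancyStringFirstApproach_spec : Claim_equal_makeFancyStringFirstApproach := by
  intro s _
  unfold Spec_makeFancyStringFirstApproach makeFancyStringFirstApproach makeFancyStringFirstApproach_alt
  rw [pvFoldB]
  rw [show PySem.List.pyGet? ([] : List Char) (-2) = none by rfl]
  rw [show PySem.List.pyGet? ([] : List Char) (-1) = none by rfl]
  simp only [List.nil_append]
  obtain ⟨hNT, hLen, hGo⟩ := pvLoop_inv s.toList (s.toList.length - 1)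
  rw [← hGo none none]
  congr 1
  refine (pvGo_id _ none none ?_ ?_ ?_).symm
  · exact pvNTL_of_NT _ (fun p hp => hNT p hp (by omega))
  · intro c hc; simp at hc
  · intro c hc; simp at hc
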